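-- pv_equiv track=rewrite | github.com/lolrazh/parameter-golf | train_modal.py | parse_kv_line
-- ===== SOURCE A (Python) =====
-- def parse_kv_line(line: str | None, prefix: str) -> dict[str, str]:
--     if line is None or not line.startswith(prefix):
--         return {}
--     values: dict[str, str] = {}
--     for token in line[len(prefix) :].strip().split():
--         if ":" not in token:
--             continue
--         key, value = token.split(":", 1)
--         values[key] = value
--     return values
-- ===== SOURCE B (Python) =====
-- def parse_kv_line(line, prefix):
--     if line is None or not line.startswith(prefix):
--         return {}
--     values = {}
--     key = None   # None = no colon seen yet in the current token
--     buf = []     # characters of the current key (before colon) or value (after)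
--     for ch in line[len(prefix):] + " ":
--         if ch.isspace():
--             if key is not None:
--                 values[key] = "".join(buf)
--             key = None
--             buf = []
--         elif ch == ":" and key is None:
--             key = "".join(buf)
--             buf = []
--         else:
--             buf.append(ch)
--     return values
-- ===== Notes on version B (the rewrite author's own statement) =====
-- stated objective: alternative
-- what changed: Replaces strip+split()+per-token split(':',1) with a single character-level state-machine pass that builds keys and values on the fly and flushes at whitespace boundaries.
import Mathlib
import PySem

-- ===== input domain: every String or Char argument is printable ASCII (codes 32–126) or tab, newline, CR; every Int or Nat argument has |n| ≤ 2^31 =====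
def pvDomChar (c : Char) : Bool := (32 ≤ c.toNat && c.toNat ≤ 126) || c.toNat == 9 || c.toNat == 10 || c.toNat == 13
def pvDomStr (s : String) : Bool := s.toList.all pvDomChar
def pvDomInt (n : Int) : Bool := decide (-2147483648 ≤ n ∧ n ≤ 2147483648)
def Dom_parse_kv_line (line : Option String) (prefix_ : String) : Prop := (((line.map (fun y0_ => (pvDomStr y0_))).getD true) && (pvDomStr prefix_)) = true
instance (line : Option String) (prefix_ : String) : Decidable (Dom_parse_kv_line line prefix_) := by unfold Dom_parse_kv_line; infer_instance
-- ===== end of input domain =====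

-- B replaces strip+split()+per-token split(':',1) with a single character-level state machine; alternative decomposition, same cost.

-- ===== PORT A =====
def parse_kv_line (line : Option String) (prefix_ : String) : List (String × String) :=
  match line with
  | none => []
  | some l =>
    if PySem.Chars.startswith l.toList prefix_.toList = false then []
    else
      ((PySem.Chars.split₀ (PySem.Chars.strip
          (PySem.List.slice l.toList (some (prefix_.toList.length : Int)) none))).foldl
        (fun d token =>
          if PySem.Chars.isIn [':'] token = false then d
          else
            match PySem.Chars.splitOnMax token [':'] 1 with
            | [key, value] => d.insert key value
            | _ => d)
        PySem.Dict.empty).items.map (fun p => (String.mk p.1, String.mk p.2))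

-- ===== PORT B =====
-- one step of Source B's loop body: state = (values, key, buf)
def altStep (st : PySem.Dict (List Char) (List Char) × Option (List Char) × List Char)
    (ch : Char) : PySem.Dict (List Char) (List Char) × Option (List Char) × List Char :=
  match st with
  | (d, key?, buf) =>
    if PySem.Chars.isspace ch then
      ((match key? with
        | some k => d.insert k buf
        | none => d), none, [])
    else if ch == ':' && key?.isNone then
      (d, some buf, [])
    else
      (d, key?, buf ++ [ch])

def parse_kv_line_alt (line : Option String) (prefix_ : String) : List (String × String) :=
  match line with
  | none => []
  | some l =>
    if PySem.Chars.startswith l.toList prefix_.toList = false then []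
    else
      (((PySem.List.slice l.toList (some (prefix_.toList.length : Int)) none) ++ [' ']).foldl
        altStep (PySem.Dict.empty, none, [])).1.items.map (fun p => (String.mk p.1, String.mk p.2))

-- ===== PRECONDITION & SPEC =====
def Spec_parse_kv_line (line : Option String) (prefix_ : String) (out : List (String × String)) : Prop := out = parse_kv_line_alt line prefix_
instance (line : Option String) (prefix_ : String) (out : List (String × String)) : Decidable (Spec_parse_kv_line line prefix_ out) := by unfold Spec_parse_kv_line; infer_instance

-- ===== CLAIM (what is proved, stated in full; the proofs are below) =====
def Claim_equal_parse_kv_line : Prop := ∀ (line : Option String) (prefix_ : String), Dom_parse_kv_line line prefix_ → Spec_parse_kv_line line prefix_ (parse_kv_line line prefix_)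

-- ===== LEMMAS AND PROOFS =====

-- the value A's loop body adds for one token, in closed form
def tokStep (d : PySem.Dict (List Char) (List Char)) (t : List Char) :
    PySem.Dict (List Char) (List Char) :=
  if ':' ∈ t then d.insert (t.takeWhile (· != ':')) ((t.dropWhile (· != ':')).tail) else d

theorem go0_eq (fuel : Nat) (rest : List Char) (acc : List (List Char)) :
    PySem.Chars.splitOnMax.go [':'] fuel 0 rest [] acc = (rest :: acc).reverse := by
  cases fuel with
  | zero => simp [PySem.Chars.splitOnMax.go]
  | succ f => cases rest <;> simp [PySem.Chars.splitOnMax.go]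

theorem go1_eq (l : List Char) : ∀ (fuel : Nat) (cur : List Char) (acc : List (List Char)),
    l.length < fuel →
    PySem.Chars.splitOnMax.go [':'] fuel 1 l cur acc =
      if ':' ∈ l then
        acc.reverse ++ [cur.reverse ++ l.takeWhile (· != ':'), (l.dropWhile (· != ':')).tail]
      else acc.reverse ++ [cur.reverse ++ l] := by
  induction l with
  | nil =>
    intro fuel cur acc h
    cases fuel with
    | zero => omega
    | succ f => simp [PySem.Chars.splitOnMax.go]
  | cons c rest ih =>
    intro fuel cur acc h
    cases fuel with
    | zero => omega
    | succ f =>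
      by_cases hc : c = ':'
      · subst hc
        simp [PySem.Chars.splitOnMax.go, List.isPrefixOf, go0_eq]
      · have hpre : [':'].isPrefixOf (c :: rest) = false := by
          simp only [List.isPrefixOf, Bool.and_eq_false_iff, beq_eq_false_iff_ne, ne_eq]
          exact Or.inl fun h' => hc h'.symm
        have : rest.length < f := by simpa using h
        simp only [PySem.Chars.splitOnMax.go, hpre, if_neg (by omega : ¬ (1 : Nat) = 0)]
        rw [ih f (c :: cur) acc this]
        by_cases hm : ':' ∈ rest
        · have : ':' ∈ c :: rest := by simp [hm]
          simp [hm, this, hc, bne]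
        · have : ':' ∉ c :: rest := by
            simp only [List.mem_cons, not_or]
            exact ⟨fun h' => hc h'.symm, hm⟩
          simp [hm, this]

theorem splitColon (t : List Char) (h : ':' ∈ t) :
    PySem.Chars.splitOnMax t [':'] 1 =
      [t.takeWhile (· != ':'), (t.dropWhile (· != ':')).tail] := by
  unfold PySem.Chars.splitOnMax
  rw [if_neg (by omega)]
  simp only [Int.toNat_one]
  rw [go1_eq t (t.length + 1) [] [] (by omega)]
  simp [h]

theorem isIn_colon (t : List Char) : PySem.Chars.isIn [':'] t = true ↔ ':' ∈ t := by
  rw [PySem.Chars.isIn_iff_infix]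
  constructor
  · intro h; exact h.sublist.mem (by simp)
  · intro h
    obtain ⟨l1, l2, rfl⟩ := List.append_of_mem h
    exact ⟨l1, l2, by simp⟩

theorem aStep_eq (d : PySem.Dict (List Char) (List Char)) (t : List Char) :
    (if PySem.Chars.isIn [':'] t = false then d
     else
       match PySem.Chars.splitOnMax t [':'] 1 with
       | [key, value] => d.insert key value
       | _ => d) = tokStep d t := by
  by_cases h : ':' ∈ t
  · have := (isIn_colon t).mpr h
    rw [if_neg (by simp [this]), splitColon t h]
    simp [tokStep, h]
  · have : PySem.Chars.isIn [':'] t = false := by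
      cases hx : PySem.Chars.isIn [':'] t
      · rfl
      · exact absurd ((isIn_colon t).mp hx) h
    simp [this, tokStep, h]

-- ===== split₀ structure =====

theorem go_acc (s : List Char) : ∀ (cur : List Char) (acc : List (List Char)),
    PySem.Chars.split₀.go s cur acc = acc.reverse ++ PySem.Chars.split₀.go s cur [] := by
  induction s with
  | nil =>
    intro cur acc
    simp only [PySem.Chars.split₀.go]
    split_ifs <;> simp
  | cons c rest ih =>
    intro cur acc
    by_cases hs : PySem.Chars.isspace c
    · by_cases h : cur.isEmpty
      · simp only [PySem.Chars.split₀.go, hs, if_true, h]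
        exact ih [] acc
      · simp only [PySem.Chars.split₀.go, hs, if_true, h]
        rw [ih [] (cur.reverse :: acc), ih [] [cur.reverse]]
        simp
    · simp only [PySem.Chars.split₀.go, hs]
      exact ih (c :: cur) acc

theorem split₀_cons_space (c : Char) (s : List Char) (h : PySem.Chars.isspace c = true) :
    PySem.Chars.split₀ (c :: s) = PySem.Chars.split₀ s := by
  simp [PySem.Chars.split₀, PySem.Chars.split₀.go, h]

theorem go_pending (s : List Char) : ∀ (cur : List Char), cur ≠ [] →
    PySem.Chars.split₀.go s cur [] =
      (cur.reverse ++ s.takeWhile (fun c => !PySem.Chars.isspace c)) ::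
        PySem.Chars.split₀ (s.dropWhile (fun c => !PySem.Chars.isspace c)) := by
  induction s with
  | nil =>
    intro cur h
    simp [PySem.Chars.split₀.go, PySem.Chars.split₀, List.isEmpty_iff, h]
  | cons c rest ih =>
    intro cur h
    by_cases hs : PySem.Chars.isspace c
    · have hne : cur.isEmpty = false := by simpa [List.isEmpty_iff] using h
      simp only [PySem.Chars.split₀.go, hs, if_true, hne, Bool.false_eq_true, if_false]
      rw [go_acc]
      rw [List.takeWhile_cons_of_neg (by simp [hs]), List.dropWhile_cons_of_neg (by simp [hs])]
      rw [split₀_cons_space c rest hs]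
      simp [PySem.Chars.split₀]
    · simp only [PySem.Chars.split₀.go, hs]
      rw [ih (c :: cur) (by simp)]
      simp [hs]

theorem split₀_cons_nonspace (c : Char) (s : List Char) (h : PySem.Chars.isspace c = false) :
    PySem.Chars.split₀ (c :: s) =
      (c :: s.takeWhile (fun c => !PySem.Chars.isspace c)) ::
        PySem.Chars.split₀ (s.dropWhile (fun c => !PySem.Chars.isspace c)) := by
  show PySem.Chars.split₀.go (c :: s) [] [] = _
  simp only [PySem.Chars.split₀.go, h]
  rw [go_pending s [c] (by simp)]
  simp

theorem go_all_space (ws : List Char) (hws : ∀ c ∈ ws, PySem.Chars.isspace c = true) :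
    ∀ (cur : List Char) (acc : List (List Char)),
    PySem.Chars.split₀.go ws cur acc = PySem.Chars.split₀.go [] cur acc := by
  induction ws with
  | nil => intro cur acc; rfl
  | cons w ws' ih =>
    intro cur acc
    have hw := hws w (by simp)
    have hws' : ∀ c ∈ ws', PySem.Chars.isspace c = true := fun c hc => hws c (by simp [hc])
    by_cases h : cur.isEmpty
    · simp only [PySem.Chars.split₀.go, hw, if_true, h]
      rw [ih hws' [] acc]
      simp [PySem.Chars.split₀.go]
    · simp only [PySem.Chars.split₀.go, hw, if_true, h]
      rw [ih hws' [] (cur.reverse :: acc)]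
      simp [PySem.Chars.split₀.go]

theorem go_append_ws (s : List Char) (ws : List Char)
    (hws : ∀ c ∈ ws, PySem.Chars.isspace c = true) :
    ∀ (cur : List Char) (acc : List (List Char)),
    PySem.Chars.split₀.go (s ++ ws) cur acc = PySem.Chars.split₀.go s cur acc := by
  induction s with
  | nil => intro cur acc; simpa using go_all_space ws hws cur acc
  | cons c rest ih =>
    intro cur acc
    by_cases hs : PySem.Chars.isspace c
    · by_cases h : cur.isEmpty <;>
        simp [PySem.Chars.split₀.go, hs, h, ih]
    · simp [PySem.Chars.split₀.go, hs, ih]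

theorem split₀_strip (s : List Char) :
    PySem.Chars.split₀ (PySem.Chars.strip s) = PySem.Chars.split₀ s := by
  have hl : PySem.Chars.split₀ (PySem.Chars.lstrip s) = PySem.Chars.split₀ s := by
    unfold PySem.Chars.lstrip
    induction s with
    | nil => rfl
    | cons c rest ih =>
      by_cases h : PySem.Chars.isspace c
      · rw [List.dropWhile_cons_of_pos (by simpa using h), ih, split₀_cons_space c rest h]
      · rw [List.dropWhile_cons_of_neg (by simpa using h)]
  have hr : ∀ u : List Char,
      PySem.Chars.split₀ (PySem.Chars.rstrip u) = PySem.Chars.split₀ u := by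
    intro u
    have hdecomp : u = PySem.Chars.rstrip u ++ (u.reverse.takeWhile PySem.Chars.isspace).reverse := by
      unfold PySem.Chars.rstrip
      conv_lhs => rw [← u.reverse_reverse,
        ← List.takeWhile_append_dropWhile (p := PySem.Chars.isspace) (l := u.reverse)]
      rw [List.reverse_append]
    have hws : ∀ c ∈ (u.reverse.takeWhile PySem.Chars.isspace).reverse,
        PySem.Chars.isspace c = true := by
      intro c hc
      rw [List.mem_reverse] at hc
      exact List.mem_takeWhile_imp hc
    conv_rhs => rw [hdecomp]
    unfold PySem.Chars.split₀
    rw [go_append_ws _ _ hws]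
  unfold PySem.Chars.strip
  rw [hr, hl]

-- ===== scan structure =====

theorem scan_value_phase (t : List Char) (ht : ∀ c ∈ t, PySem.Chars.isspace c = false) :
    ∀ (d : PySem.Dict (List Char) (List Char)) (k buf : List Char),
    t.foldl altStep (d, some k, buf) = (d, some k, buf ++ t) := by
  induction t with
  | nil => intro d k buf; simp
  | cons c rest ih =>
    intro d k buf
    have hc := ht c (by simp)
    have hrest : ∀ c ∈ rest, PySem.Chars.isspace c = false := fun c hc => ht c (by simp [hc])
    simp only [List.foldl_cons, altStep, hc, Bool.false_eq_true, if_false,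
      Option.isNone_some, Bool.and_false]
    rw [ih hrest]
    simp

theorem scan_token (t : List Char) (ht : ∀ c ∈ t, PySem.Chars.isspace c = false) :
    ∀ (d : PySem.Dict (List Char) (List Char)) (buf : List Char),
    t.foldl altStep (d, none, buf) =
      if ':' ∈ t then (d, some (buf ++ t.takeWhile (· != ':')), (t.dropWhile (· != ':')).tail)
      else (d, none, buf ++ t) := by
  induction t with
  | nil => intro d buf; simp
  | cons c rest ih =>
    intro d buf
    have hc := ht c (by simp)
    have hrest : ∀ c ∈ rest, PySem.Chars.isspace c = false := fun c hc => ht c (by simp [hc])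
    by_cases hcol : c = ':'
    · subst hcol
      simp only [List.foldl_cons, altStep, hc, Bool.false_eq_true, if_false,
        Option.isNone_none, Bool.and_true, beq_self_eq_true, if_true]
      rw [scan_value_phase rest hrest]
      simp
    · simp only [List.foldl_cons, altStep, hc, Bool.false_eq_true, if_false,
        Option.isNone_none, Bool.and_true]
      rw [if_neg (by simp [hcol]), ih hrest]
      by_cases hm : ':' ∈ rest
      · have : ':' ∈ c :: rest := by simp [hm]
        simp [hm, this, hcol]
      · have : ':' ∉ c :: rest := by
          simp only [List.mem_cons, not_or]; exact ⟨fun h => hcol h.symm, hm⟩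
        simp [hm, this]

theorem flush_token (t : List Char) (htns : ∀ c ∈ t, PySem.Chars.isspace c = false)
    (w : Char) (hw : PySem.Chars.isspace w = true)
    (d : PySem.Dict (List Char) (List Char)) :
    altStep (t.foldl altStep (d, none, [])) w = (tokStep d t, none, []) := by
  rw [scan_token t htns d []]
  by_cases hm : ':' ∈ t
  · simp [hm, altStep, hw, tokStep]
  · simp [hm, altStep, hw, tokStep]

theorem scan_main (n : Nat) : ∀ (s : List Char), s.length ≤ n →
    ∀ (d : PySem.Dict (List Char) (List Char)),
    ((s ++ [' ']).foldl altStep (d, none, [])).1 =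
      (PySem.Chars.split₀ s).foldl tokStep d := by
  induction n with
  | zero =>
    intro s hs d
    have : s = [] := List.length_eq_zero_iff.mp (Nat.le_zero.mp hs)
    subst this
    simp [altStep, PySem.Chars.isspace, PySem.Chars.split₀, PySem.Chars.split₀.go]
  | succ n ih =>
    intro s hs d
    cases s with
    | nil => exact ih [] (by simp) d
    | cons c rest =>
      have hrest_le : rest.length ≤ n := by simpa using Nat.lt_succ_iff.mp (by simpa using hs)
      by_cases hc : PySem.Chars.isspace c
      · have h1 : ((c :: rest ++ [' ']).foldl altStep (d, none, [])) =
            ((rest ++ [' ']).foldl altStep (d, none, [])) := by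
          simp [altStep, hc]
        rw [h1, split₀_cons_space c rest hc]
        exact ih rest hrest_le d
      · have hcf : PySem.Chars.isspace c = false := by simpa using hc
        have htns : ∀ x ∈ c :: rest.takeWhile (fun x => !PySem.Chars.isspace x),
            PySem.Chars.isspace x = false := by
          intro x hx
          rcases List.mem_cons.mp hx with h | h
          · subst h; exact hcf
          · simpa using List.mem_takeWhile_imp h
        have hsplit : rest = rest.takeWhile (fun x => !PySem.Chars.isspace x) ++
            rest.dropWhile (fun x => !PySem.Chars.isspace x) :=
          (List.takeWhile_append_dropWhile).symm
        rw [split₀_cons_nonspace c rest hcf, List.foldl_cons]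
        cases hr' : rest.dropWhile (fun x => !PySem.Chars.isspace x) with
        | nil =>
          have hts : rest.takeWhile (fun x => !PySem.Chars.isspace x) = rest := by
            conv_rhs => rw [hsplit, hr']
            simp
          rw [hts]
          have h2 : (c :: rest ++ [' ']).foldl altStep (d, none, []) =
              altStep ((c :: rest).foldl altStep (d, none, [])) ' ' := by
            simp
          rw [h2]
          have hct : (c :: rest).foldl altStep (d, none, []) =
              (c :: rest.takeWhile (fun x => !PySem.Chars.isspace x)).foldl altStep
                (d, none, []) := by rw [hts]
          rw [hct, flush_token _ htns ' ' (by decide) d, hts]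
          simp [PySem.Chars.split₀, PySem.Chars.split₀.go]
        | cons w r' =>
          have hw : PySem.Chars.isspace w = true := by
            have h3 := List.head?_dropWhile_not (fun x => !PySem.Chars.isspace x) rest
            rw [hr'] at h3
            simpa using h3
          have hdecomp : c :: rest ++ [' '] =
              (c :: rest.takeWhile (fun x => !PySem.Chars.isspace x)) ++ (w :: (r' ++ [' '])) := by
            conv_lhs => rw [show c :: rest ++ [' '] = c :: (rest ++ [' ']) from rfl]
            conv_lhs => rw [hsplit, hr']
            simp
          rw [hdecomp, List.foldl_append]
          have h4 : (w :: (r' ++ [' '])).foldl altStep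
                ((c :: rest.takeWhile (fun x => !PySem.Chars.isspace x)).foldl altStep
                  (d, none, [])) =
              (r' ++ [' ']).foldl altStep
                (altStep ((c :: rest.takeWhile (fun x => !PySem.Chars.isspace x)).foldl altStep
                  (d, none, [])) w) := by
            simp
          rw [h4, flush_token _ htns w hw d]
          have hr'len : r'.length ≤ n := by
            have h5 : (w :: r').length ≤ rest.length := by
              rw [← hr']
              exact List.length_dropWhile_le _ _
            simp at h5
            omega
          rw [ih r' hr'len (tokStep d (c :: rest.takeWhile (fun x => !PySem.Chars.isspace x)))]
          rw [split₀_cons_space w r' hw]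

-- ===== VERDICT (by name: the statement is the Claim_ definition above) =====
theorem parse_kv_line_spec : Claim_equal_parse_kv_line := by
  intro line prefix_ _hdom
  unfold Spec_parse_kv_line parse_kv_line parse_kv_line_alt
  cases line with
  | none => rfl
  | some l =>
    dsimp only
    by_cases hp : PySem.Chars.startswith l.toList prefix_.toList = false
    · rw [if_pos hp, if_pos hp]
    · rw [if_neg hp, if_neg hp]
      have hA : (PySem.Chars.split₀ (PySem.Chars.strip
          (PySem.List.slice l.toList (some (prefix_.toList.length : Int)) none))).foldl
        (fun d token =>
          if PySem.Chars.isIn [':'] token = false then d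
          else
            match PySem.Chars.splitOnMax token [':'] 1 with
            | [key, value] => d.insert key value
            | _ => d)
        PySem.Dict.empty =
          (PySem.Chars.split₀
            (PySem.List.slice l.toList (some (prefix_.toList.length : Int)) none)).foldl
            tokStep PySem.Dict.empty := by
        rw [split₀_strip]
        exact List.foldl_ext _ _ _ (fun d t _ => aStep_eq d t)
      have hB := scan_main
        (PySem.List.slice l.toList (some (prefix_.toList.length : Int)) none).length
        (PySem.List.slice l.toList (some (prefix_.toList.length : Int)) none)
        le_rfl PySem.Dict.empty
      rw [hA, ← hB]
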